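-- pv_equiv track=rewrite | github.com/Erudite-janvi/Capstone_Projects | main.py | start_with_digit
-- ===== SOURCE A (Python) =====
-- def start_with_digit(password):
--     digit_count = 0
--     special_count = 0
--
--     for char in password:
--         if char.isdigit():
--             digit_count += 1
--             if digit_count >= 2:
--                 return True
--         elif char in "!@#$%^&*()_-~":
--             special_count += 1
--             if special_count >= 1:
--                 return True
--         else:
--             break
--
--     return False
-- ===== SOURCE B (Python) =====
-- from itertools import takewhile
--
-- SPECIALS = "!@#$%^&*()_-~"
--
-- def start_with_digit(password):
--     prefix = list(takewhile(lambda c: c.isdigit() or c in SPECIALS, password))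
--     digits = sum(1 for c in prefix if c.isdigit())
--     specials = sum(1 for c in prefix if c in SPECIALS)
--     return specials >= 1 or digits >= 2
-- ===== Notes on version B (the rewrite author's own statement) =====
-- stated objective: alternative
-- what changed: Replaces A's early-exit loop with mutable counters by collect-then-evaluate: take the leading run of digit/special characters, count digits and specials over it, and return specials>=1 or digits>=2.
import Mathlib
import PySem

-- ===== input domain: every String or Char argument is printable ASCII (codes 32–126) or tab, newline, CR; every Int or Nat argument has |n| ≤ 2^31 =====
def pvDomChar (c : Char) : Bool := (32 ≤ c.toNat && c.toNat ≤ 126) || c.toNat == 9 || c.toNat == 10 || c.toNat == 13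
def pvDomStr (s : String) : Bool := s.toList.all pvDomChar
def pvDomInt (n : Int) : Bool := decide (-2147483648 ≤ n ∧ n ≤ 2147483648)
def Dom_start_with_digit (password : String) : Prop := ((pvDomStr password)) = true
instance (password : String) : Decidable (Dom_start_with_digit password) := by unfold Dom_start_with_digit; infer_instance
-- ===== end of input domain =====

-- B re-implements A's early-exit counter loop as collect-then-evaluate over the leading digit/special run; same values everywhere (objective: alternative).
-- ===== PORT A =====
def pySpecials : List Char := ['!','@','#','$','%','^','&','*','(',')','_','-','~']  -- the chars of "!@#$%^&*()_-~"

-- literal port of A's for-loop with the two counters and early returns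
def swdLoopA : List Char → Int → Int → Bool
  | [], _, _ => false
  | c :: cs, digit_count, special_count =>
    if PySem.Chars.isdigit c then
      if digit_count + 1 ≥ 2 then true
      else swdLoopA cs (digit_count + 1) special_count
    else if c ∈ pySpecials then
      if special_count + 1 ≥ 1 then true
      else swdLoopA cs digit_count (special_count + 1)
    else false

def start_with_digit (password : String) : Bool :=
  swdLoopA password.toList 0 0

-- ===== PORT B =====
def swdPred (c : Char) : Bool := PySem.Chars.isdigit c || decide (c ∈ pySpecials)

def start_with_digit_alt (password : String) : Bool :=
  let pfx := password.toList.takeWhile swdPred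
  let digits : Int := (pfx.countP (fun c => PySem.Chars.isdigit c) : Int)
  let specials : Int := (pfx.countP (fun c => decide (c ∈ pySpecials)) : Int)
  decide (specials ≥ 1) || decide (digits ≥ 2)

-- ===== PRECONDITION & SPEC =====
def Spec_start_with_digit (password : String) (out : Bool) : Prop := out = start_with_digit_alt password
instance (password : String) (out : Bool) : Decidable (Spec_start_with_digit password out) := by unfold Spec_start_with_digit; infer_instance

-- ===== CLAIM (what is proved, stated in full; the proofs are below) =====
def Claim_equal_start_with_digit : Prop := ∀ (password : String), Dom_start_with_digit password → Spec_start_with_digit password (start_with_digit password)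

-- ===== LEMMAS AND PROOFS =====

-- a decimal digit is not one of the special characters
theorem digit_not_special (c : Char) (h : PySem.Chars.isdigit c = true) : c ∉ pySpecials := by
  intro hm
  simp only [pySpecials, List.mem_cons, List.not_mem_nil, or_false] at hm
  rcases hm with rfl|rfl|rfl|rfl|rfl|rfl|rfl|rfl|rfl|rfl|rfl|rfl|rfl <;> simp [PySem.Chars.isdigit] at h

-- invariant of A's loop (special_count is always 0 when looping; digit_count stays ≤ 1)
theorem swdLoopA_eq (cs : List Char) : ∀ (d : Int), d ≤ 1 →
    swdLoopA cs d 0 =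
      (decide (((cs.takeWhile swdPred).countP (fun c => decide (c ∈ pySpecials)) : Int) ≥ 1) ||
       decide (d + ((cs.takeWhile swdPred).countP (fun c => PySem.Chars.isdigit c) : Int) ≥ 2)) := by
  induction cs with
  | nil => intro d _; simp [swdLoopA]; omega
  | cons c cs ih =>
    intro d hd
    by_cases hdig : PySem.Chars.isdigit c = true
    · have hp : swdPred c = true := by simp [swdPred, hdig]
      by_cases h2 : d + 1 ≥ 2
      · simp [swdLoopA, hdig, h2, hp, List.countP_cons]
        omega
      · simp only [swdLoopA, hdig, if_neg h2]
        rw [ih (d + 1) (by omega)]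
        simp [hp, hdig, digit_not_special c hdig]
        ring_nf
    · by_cases hsp : c ∈ pySpecials
      · have hp : swdPred c = true := by simp [swdPred, hsp]
        simp [swdLoopA, hdig, hsp, hp]
      · have hp : swdPred c = false := by simp [swdPred, hdig, hsp]
        simp [swdLoopA, hdig, hsp, hp]
        omega

-- ===== VERDICT (by name: the statement is the Claim_ definition above) =====
theorem start_with_digit_spec : Claim_equal_start_with_digit := by
  intro password _
  unfold Spec_start_with_digit start_with_digit start_with_digit_alt
  rw [swdLoopA_eq _ 0 (by omega)]
  simp
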